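-- pv_equiv track=rewrite | github.com/harisibrahimkv/assignment | process_mails.py | action_body_builder
-- ===== SOURCE A (Python) =====
-- def action_body_builder(actions):
--     action_body = {"addLabelIds": [], "removeLabelIds": []}
--     for action in actions:
--         if action["action"] == "mark as read":
--             action_body["removeLabelIds"].append("UNREAD")
--         elif action["action"] == "mark as unread":
--             action_body["addLabelIds"].append("UNREAD")
--         elif action["action"] == "move message":
--             action_body["addLabelIds"].append(action["label"])
--         else:
--             continue
--
--     return action_body
-- ===== SOURCE B (Python) =====
-- # Table-driven two-stage pipeline: actions are first normalized into a stream of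
-- # (target-key, label) tokens via a dispatch table, then the tokens are grouped by key.
-- _DISPATCH = {
--     "mark as read": ("removeLabelIds", None),
--     "mark as unread": ("addLabelIds", None),
--     "move message": ("addLabelIds", "label"),
-- }
--
--
-- def action_body_builder(actions):
--     tokens = []
--     for action in actions:
--         entry = _DISPATCH.get(action["action"])
--         if entry is not None:
--             key, field = entry
--             tokens.append((key, "UNREAD" if field is None else action[field]))
--     body = {"addLabelIds": [], "removeLabelIds": []}
--     for key, label in tokens:
--         body[key].append(label)
--     return body
-- ===== Notes on version B (the rewrite author's own statement) =====
-- stated objective: alternative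
-- what changed: Replaces A's if/elif string-comparison loop appending into two named lists by a table-driven two-stage pipeline: a dispatch dict normalizes each action into a (target-key, label) token, and a second grouping pass distributes the tokens into the result dict by key.
import Mathlib
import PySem

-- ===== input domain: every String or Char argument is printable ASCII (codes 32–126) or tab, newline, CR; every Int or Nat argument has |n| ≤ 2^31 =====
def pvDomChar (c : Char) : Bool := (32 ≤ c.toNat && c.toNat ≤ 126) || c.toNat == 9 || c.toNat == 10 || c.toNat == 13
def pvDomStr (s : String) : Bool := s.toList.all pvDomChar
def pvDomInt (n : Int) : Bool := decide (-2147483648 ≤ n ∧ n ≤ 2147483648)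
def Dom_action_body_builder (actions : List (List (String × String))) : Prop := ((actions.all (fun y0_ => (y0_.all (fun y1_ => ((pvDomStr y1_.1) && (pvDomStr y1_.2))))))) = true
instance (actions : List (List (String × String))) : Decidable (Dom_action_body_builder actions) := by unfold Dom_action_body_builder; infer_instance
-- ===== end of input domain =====

-- B replaces A's if/elif loop appending into two named lists by a table-driven two-stage
-- pipeline: normalize actions into (key, label) tokens, then group tokens by key
-- (objective: alternative decomposition, same cost).

-- shared helper: first-match dict lookup action[k] (Pre_ guarantees the key is present,
-- so the "" default is never reached on admitted inputs)
def pvLook (a : List (String × String)) (k : String) : String :=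
  ((a.find? (fun p => p.1 == k)).map (·.2)).getD ""

-- ===== PORT A =====
def action_body_builder (actions : List (List (String × String))) : List (String × List String) :=
  let st := actions.foldl (fun (st : List String × List String) action =>
    if pvLook action "action" == "mark as read" then (st.1, st.2 ++ ["UNREAD"])
    else if pvLook action "action" == "mark as unread" then (st.1 ++ ["UNREAD"], st.2)
    else if pvLook action "action" == "move message" then (st.1 ++ [pvLook action "label"], st.2)
    else st) ([], [])
  [("addLabelIds", st.1), ("removeLabelIds", st.2)]

-- ===== PORT B =====
-- the module-level dispatch table _DISPATCH
def pvDispatch : List (String × (String × Option String)) :=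
  [("mark as read", ("removeLabelIds", none)),
   ("mark as unread", ("addLabelIds", none)),
   ("move message", ("addLabelIds", some "label"))]

def action_body_builder_alt (actions : List (List (String × String))) : List (String × List String) :=
  let tokens := actions.foldl (fun (ts : List (String × String)) action =>
    match ((pvDispatch.find? (fun p => p.1 == pvLook action "action")).map (·.2)) with
    | none => ts
    | some (key, field) =>
        ts ++ [(key, match field with | none => "UNREAD" | some f => pvLook action f)]) []
  let st := tokens.foldl (fun (st : List String × List String) t =>
    if t.1 == "addLabelIds" then (st.1 ++ [t.2], st.2) else (st.1, st.2 ++ [t.2])) ([], [])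
  [("addLabelIds", st.1), ("removeLabelIds", st.2)]

-- ===== PRECONDITION & SPEC =====
-- Pre_ excludes exactly the inputs where Python A raises KeyError: an action dict missing
-- the "action" key, or a "move message" action missing the "label" key.
def Pre_action_body_builder (actions : List (List (String × String))) : Prop :=
  ∀ a ∈ actions, (a.find? (fun p => p.1 == "action")).isSome = true ∧
    (pvLook a "action" = "move message" → (a.find? (fun p => p.1 == "label")).isSome = true)
instance (actions : List (List (String × String))) : Decidable (Pre_action_body_builder actions) := by
  unfold Pre_action_body_builder; infer_instance

def pvWitness_action_body_builder : (List (List (String × String))) :=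
  [[("action", "mark as unread")], [("action", "move message"), ("label", "Lbl")], [("action", "mark as read")], [("action", "skip")]]

def Spec_action_body_builder (actions : List (List (String × String))) (out : List (String × List String)) : Prop := out = action_body_builder_alt actions
instance (actions : List (List (String × String))) (out : List (String × List String)) : Decidable (Spec_action_body_builder actions out) := by unfold Spec_action_body_builder; infer_instance

-- ===== CLAIM (what is proved, stated in full; the proofs are below) =====
def Claim_equal_action_body_builder : Prop := ∀ (actions : List (List (String × String))), Dom_action_body_builder actions → Pre_action_body_builder actions → Spec_action_body_builder actions (action_body_builder actions)

-- ===== LEMMAS AND PROOFS =====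
-- the token an action contributes (as a 0/1-element list)
def pvTok (a : List (String × String)) : List (String × String) :=
  match ((pvDispatch.find? (fun p => p.1 == pvLook a "action")).map (·.2)) with
  | none => []
  | some (key, field) => [(key, match field with | none => "UNREAD" | some f => pvLook a f)]

theorem pv_tokens_eq (actions : List (List (String × String))) (init : List (String × String)) :
    actions.foldl (fun (ts : List (String × String)) action =>
      match ((pvDispatch.find? (fun p => p.1 == pvLook action "action")).map (·.2)) with
      | none => ts
      | some (key, field) =>
          ts ++ [(key, match field with | none => "UNREAD" | some f => pvLook action f)]) init
    = init ++ actions.flatMap pvTok := by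
  induction actions generalizing init with
  | nil => simp
  | cons a rest ih =>
    simp only [List.foldl_cons, List.flatMap_cons]
    rcases h : ((pvDispatch.find? (fun p => p.1 == pvLook a "action")).map (·.2)) with _ | ⟨key, field⟩
    · rw [ih]; simp [pvTok, h]
    · rw [ih]; simp [pvTok, h]

theorem pv_main (actions : List (List (String × String))) (x y : List String) :
    actions.foldl (fun (st : List String × List String) action =>
      if pvLook action "action" == "mark as read" then (st.1, st.2 ++ ["UNREAD"])
      else if pvLook action "action" == "mark as unread" then (st.1 ++ ["UNREAD"], st.2)
      else if pvLook action "action" == "move message" then (st.1 ++ [pvLook action "label"], st.2)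
      else st) (x, y)
    = (actions.flatMap pvTok).foldl (fun (st : List String × List String) t =>
        if t.1 == "addLabelIds" then (st.1 ++ [t.2], st.2) else (st.1, st.2 ++ [t.2])) (x, y) := by
  induction actions generalizing x y with
  | nil => simp
  | cons a rest ih =>
    simp only [List.foldl_cons, List.flatMap_cons, List.foldl_append]
    by_cases h1 : pvLook a "action" = "mark as read"
    · simp only [pvTok, pvDispatch]
      simp [h1]
      simpa using ih x (y ++ ["UNREAD"])
    · by_cases h2 : pvLook a "action" = "mark as unread"
      · simp only [pvTok, pvDispatch]
        simp [h2]
        simpa using ih (x ++ ["UNREAD"]) y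
      · by_cases h3 : pvLook a "action" = "move message"
        · simp only [pvTok, pvDispatch]
          simp [h3]
          simpa using ih (x ++ [pvLook a "label"]) y
        · have e1 : ("mark as read" == pvLook a "action") = false :=
            beq_eq_false_iff_ne.mpr (fun h => h1 h.symm)
          have e2 : ("mark as unread" == pvLook a "action") = false :=
            beq_eq_false_iff_ne.mpr (fun h => h2 h.symm)
          have e3 : ("move message" == pvLook a "action") = false :=
            beq_eq_false_iff_ne.mpr (fun h => h3 h.symm)
          simp only [pvTok, pvDispatch]
          simp [h1, h2, h3, e1, e2, e3]
          simpa using ih x y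

-- ===== VERDICT (by name: the statement is the Claim_ definition above) =====
theorem action_body_builder_spec : Claim_equal_action_body_builder := by
  intro actions _ _
  unfold Spec_action_body_builder action_body_builder action_body_builder_alt
  simp only [pv_tokens_eq, List.nil_append, pv_main]
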